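-- pv_equiv track=rewrite | github.com/aryan-2026/ReconAI--AI-Based-Reconnaissance-Tool | modules/http_discovery.py | _detect_waf
-- ===== SOURCE A (Python) =====
-- def _detect_waf(headers: dict) -> str:
--     waf_signals = {
--         "cloudflare":   "cf-ray",
--         "sucuri":       "x-sucuri-id",
--         "akamai":       "x-check-cacheable",
--         "incapsula":    "x-iinfo",
--         "barracuda":    "barra_counter_session",
--     }
--     h_lower = {k.lower(): v for k, v in headers.items()}
--     for waf, signal in waf_signals.items():
--         if signal in h_lower:
--             return waf
--     return ""
-- ===== SOURCE B (Python) =====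
-- def _detect_waf(headers: dict) -> str:
--     # Reverse lookup: signal -> (priority, vendor). Single pass over the
--     # headers keeping the hit with the smallest priority; correct because
--     # returning the first signal in table order that is present is the same
--     # as returning the present signal of minimal table index.
--     priority = {
--         "cf-ray":                (0, "cloudflare"),
--         "x-sucuri-id":           (1, "sucuri"),
--         "x-check-cacheable":     (2, "akamai"),
--         "x-iinfo":               (3, "incapsula"),
--         "barra_counter_session": (4, "barracuda"),
--     }
--     best = None
--     for k in headers:
--         hit = priority.get(k.lower())
--         if hit is not None and (best is None or hit[0] < best[0]):
--             best = hit
--     return best[1] if best is not None else ""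
-- ===== Notes on version B (the rewrite author's own statement) =====
-- stated objective: alternative
-- what changed: Inverts the loops: instead of building a lowercased header index and scanning the signal table for the first member, B builds a reverse signal->(priority,vendor) map and makes a single pass over the headers keeping the hit of minimal priority.
import Mathlib
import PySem

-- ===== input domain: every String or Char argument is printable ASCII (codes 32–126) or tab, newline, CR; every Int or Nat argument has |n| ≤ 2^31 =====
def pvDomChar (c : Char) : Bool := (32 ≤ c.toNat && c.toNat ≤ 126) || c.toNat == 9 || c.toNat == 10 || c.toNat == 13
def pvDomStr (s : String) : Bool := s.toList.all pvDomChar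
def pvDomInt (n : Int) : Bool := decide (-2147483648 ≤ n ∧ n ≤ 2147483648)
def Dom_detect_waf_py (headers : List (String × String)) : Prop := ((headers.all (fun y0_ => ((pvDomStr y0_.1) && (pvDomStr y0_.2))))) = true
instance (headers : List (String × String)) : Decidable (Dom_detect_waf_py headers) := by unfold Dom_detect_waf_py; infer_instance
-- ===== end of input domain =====

-- B inverts A's loops: a reverse signal -> (priority, vendor) map and ONE pass over the headers keeping the hit of minimal priority, instead of A's lowercased header index scanned signal-by-signal (alternative; same return value).

-- ===== PORT A =====
-- the waf_signals table of A
def pvWafSignals : List (String × String) :=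
  [("cloudflare", "cf-ray"), ("sucuri", "x-sucuri-id"), ("akamai", "x-check-cacheable"),
   ("incapsula", "x-iinfo"), ("barracuda", "barra_counter_session")]

-- the 'for waf, signal in waf_signals.items()' loop with early return
def pvLoopA (hl : PySem.Dict String String) : List (String × String) → String
  | [] => ""
  | (waf, signal) :: rest => if hl.contains signal then waf else pvLoopA hl rest

def detect_waf_py (headers : List (String × String)) : String :=
  let h_lower := headers.foldl (fun d p => d.insert (PySem.Str.lower p.1) p.2) PySem.Dict.empty
  pvLoopA h_lower pvWafSignals

-- ===== PORT B =====
-- B's reverse lookup table: signal -> (priority, vendor)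
def pvPriority : PySem.Dict String (Int × String) :=
  PySem.Dict.ofList
    [("cf-ray", (0, "cloudflare")), ("x-sucuri-id", (1, "sucuri")),
     ("x-check-cacheable", (2, "akamai")), ("x-iinfo", (3, "incapsula")),
     ("barra_counter_session", (4, "barracuda"))]

-- one iteration of B's 'for k in headers' loop: keep best unless a lower-priority hit appears
def pvStep (best : Option (Int × String)) (p : String × String) : Option (Int × String) :=
  match pvPriority.get? (PySem.Str.lower p.1) with
  | none => best
  | some hit =>
      match best with
      | none => some hit
      | some b => if hit.1 < b.1 then some hit else some b

def detect_waf_py_alt (headers : List (String × String)) : String :=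
  match headers.foldl pvStep none with
  | some b => b.2
  | none => ""

-- ===== PRECONDITION & SPEC =====
def Spec_detect_waf_py (headers : List (String × String)) (out : String) : Prop := out = detect_waf_py_alt headers
instance (headers : List (String × String)) (out : String) : Decidable (Spec_detect_waf_py headers out) := by unfold Spec_detect_waf_py; infer_instance

-- ===== CLAIM =====
def Claim_equal_detect_waf_py : Prop := ∀ (headers : List (String × String)), Dom_detect_waf_py headers → Spec_detect_waf_py headers (detect_waf_py headers)

-- ===== LEMMAS AND PROOFS =====

lemma pvPriority_eq : pvPriority = PySem.Dict.mk
    [("cf-ray", ((0:Int), "cloudflare")), ("x-sucuri-id", (1, "sucuri")),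
     ("x-check-cacheable", (2, "akamai")), ("x-iinfo", (3, "incapsula")),
     ("barra_counter_session", (4, "barracuda"))] := by decide

-- left-biased minimum-priority merge; pvStep acc p = pvMerge acc (lookup of p)
def pvMerge (a b : Option (Int × String)) : Option (Int × String) :=
  match b with
  | none => a
  | some p => match a with
      | none => some p
      | some q => if p.1 < q.1 then some p else some q

lemma step_eq_merge (acc : Option (Int × String)) (p : String × String) :
    pvStep acc p = pvMerge acc (pvPriority.get? (PySem.Str.lower p.1)) := by
  unfold pvStep pvMerge
  cases pvPriority.get? (PySem.Str.lower p.1) <;> cases acc <;> rfl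

lemma merge_none_left (b : Option (Int × String)) : pvMerge none b = b := by
  cases b <;> rfl

lemma merge_assoc (a b c : Option (Int × String)) :
    pvMerge (pvMerge a b) c = pvMerge a (pvMerge b c) := by
  rcases a with _ | x <;> rcases b with _ | y <;> rcases c with _ | z <;>
    simp only [pvMerge] <;> split_ifs <;>
    simp_all only <;> split_ifs <;> first | rfl | omega | simp_all

lemma foldl_step_merge (hs : List (String × String)) (acc : Option (Int × String)) :
    hs.foldl pvStep acc = pvMerge acc (hs.foldl pvStep none) := by
  induction hs generalizing acc with
  | nil => cases acc <;> rfl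
  | cons h t ih =>
      simp only [List.foldl_cons]
      rw [ih (pvStep acc h), ih (pvStep none h), step_eq_merge acc h, step_eq_merge none h,
        merge_none_left, merge_assoc]

lemma get?_none_of_no_match (x : String) (h0 : ¬ x = "cf-ray") (h1 : ¬ x = "x-sucuri-id")
    (h2 : ¬ x = "x-check-cacheable") (h3 : ¬ x = "x-iinfo") (h4 : ¬ x = "barra_counter_session") :
    pvPriority.get? x = none := by
  rw [pvPriority_eq]
  simp only [PySem.Dict.get?_mk_cons]
  rw [if_neg (fun e => h0 ((beq_iff_eq.mp e).symm)), if_neg (fun e => h1 ((beq_iff_eq.mp e).symm)),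
     if_neg (fun e => h2 ((beq_iff_eq.mp e).symm)), if_neg (fun e => h3 ((beq_iff_eq.mp e).symm)),
     if_neg (fun e => h4 ((beq_iff_eq.mp e).symm))]
  rfl

-- the fold computes the minimal-priority signal present among the lowered header keys
lemma fold_characterisation (hs : List (String × String)) :
    hs.foldl pvStep none =
      (if hs.any (fun p => PySem.Str.lower p.1 == "cf-ray") then some ((0 : Int), "cloudflare")
       else if hs.any (fun p => PySem.Str.lower p.1 == "x-sucuri-id") then some ((1 : Int), "sucuri")
       else if hs.any (fun p => PySem.Str.lower p.1 == "x-check-cacheable") then some ((2 : Int), "akamai")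
       else if hs.any (fun p => PySem.Str.lower p.1 == "x-iinfo") then some ((3 : Int), "incapsula")
       else if hs.any (fun p => PySem.Str.lower p.1 == "barra_counter_session") then some ((4 : Int), "barracuda")
       else none) := by
  induction hs with
  | nil => rfl
  | cons h t ih =>
      rw [List.foldl_cons, foldl_step_merge, ih, step_eq_merge, merge_none_left]
      simp only [List.any_cons]
      by_cases h0 : PySem.Str.lower h.1 = "cf-ray"
      · simp only [h0, pvPriority_eq, PySem.Dict.get?_mk_cons]
        cases t.any (fun p => PySem.Str.lower p.1 == "cf-ray") <;>
        cases t.any (fun p => PySem.Str.lower p.1 == "x-sucuri-id") <;>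
        cases t.any (fun p => PySem.Str.lower p.1 == "x-check-cacheable") <;>
        cases t.any (fun p => PySem.Str.lower p.1 == "x-iinfo") <;>
        cases t.any (fun p => PySem.Str.lower p.1 == "barra_counter_session") <;>
          simp [pvMerge]
      · by_cases h1 : PySem.Str.lower h.1 = "x-sucuri-id"
        · simp only [h1, pvPriority_eq, PySem.Dict.get?_mk_cons]
          cases t.any (fun p => PySem.Str.lower p.1 == "cf-ray") <;>
          cases t.any (fun p => PySem.Str.lower p.1 == "x-sucuri-id") <;>
          cases t.any (fun p => PySem.Str.lower p.1 == "x-check-cacheable") <;>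
          cases t.any (fun p => PySem.Str.lower p.1 == "x-iinfo") <;>
          cases t.any (fun p => PySem.Str.lower p.1 == "barra_counter_session") <;>
            simp [pvMerge]
        · by_cases h2 : PySem.Str.lower h.1 = "x-check-cacheable"
          · simp only [h2, pvPriority_eq, PySem.Dict.get?_mk_cons]
            cases t.any (fun p => PySem.Str.lower p.1 == "cf-ray") <;>
            cases t.any (fun p => PySem.Str.lower p.1 == "x-sucuri-id") <;>
            cases t.any (fun p => PySem.Str.lower p.1 == "x-check-cacheable") <;>
            cases t.any (fun p => PySem.Str.lower p.1 == "x-iinfo") <;>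
            cases t.any (fun p => PySem.Str.lower p.1 == "barra_counter_session") <;>
              simp [pvMerge]
          · by_cases h3 : PySem.Str.lower h.1 = "x-iinfo"
            · simp only [h3, pvPriority_eq, PySem.Dict.get?_mk_cons]
              cases t.any (fun p => PySem.Str.lower p.1 == "cf-ray") <;>
              cases t.any (fun p => PySem.Str.lower p.1 == "x-sucuri-id") <;>
              cases t.any (fun p => PySem.Str.lower p.1 == "x-check-cacheable") <;>
              cases t.any (fun p => PySem.Str.lower p.1 == "x-iinfo") <;>
              cases t.any (fun p => PySem.Str.lower p.1 == "barra_counter_session") <;>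
                simp [pvMerge]
            · by_cases h4 : PySem.Str.lower h.1 = "barra_counter_session"
              · simp only [h4, pvPriority_eq, PySem.Dict.get?_mk_cons]
                cases t.any (fun p => PySem.Str.lower p.1 == "cf-ray") <;>
                cases t.any (fun p => PySem.Str.lower p.1 == "x-sucuri-id") <;>
                cases t.any (fun p => PySem.Str.lower p.1 == "x-check-cacheable") <;>
                cases t.any (fun p => PySem.Str.lower p.1 == "x-iinfo") <;>
                cases t.any (fun p => PySem.Str.lower p.1 == "barra_counter_session") <;>
                  simp [pvMerge]
              · rw [get?_none_of_no_match _ h0 h1 h2 h3 h4, merge_none_left]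
                simp only [beq_eq_false_iff_ne.mpr h0, beq_eq_false_iff_ne.mpr h1,
                  beq_eq_false_iff_ne.mpr h2, beq_eq_false_iff_ne.mpr h3,
                  beq_eq_false_iff_ne.mpr h4, Bool.false_or]

-- membership in A's lowered-key dict = a rescan of the raw headers
lemma contains_foldl_insert_lower (headers : List (String × String)) (d : PySem.Dict String String) (s : String) :
    (headers.foldl (fun d p => d.insert (PySem.Str.lower p.1) p.2) d).contains s
      = (d.contains s || headers.any (fun p => PySem.Str.lower p.1 == s)) := by
  induction headers generalizing d with
  | nil => simp
  | cons p rest ih =>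
      simp only [List.foldl_cons, List.any_cons, ih, PySem.Dict.contains_insert]
      rw [BEq.comm]
      cases PySem.Str.lower p.1 == s <;> simp

-- ===== VERDICT =====
theorem detect_waf_py_spec : Claim_equal_detect_waf_py := by
  intro headers _
  unfold Spec_detect_waf_py detect_waf_py detect_waf_py_alt
  rw [fold_characterisation]
  simp only [pvLoopA, pvWafSignals, contains_foldl_insert_lower, PySem.Dict.contains_empty,
    Bool.false_or]
  cases headers.any (fun p => PySem.Str.lower p.1 == "cf-ray") <;>
  cases headers.any (fun p => PySem.Str.lower p.1 == "x-sucuri-id") <;>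
  cases headers.any (fun p => PySem.Str.lower p.1 == "x-check-cacheable") <;>
  cases headers.any (fun p => PySem.Str.lower p.1 == "x-iinfo") <;>
  cases headers.any (fun p => PySem.Str.lower p.1 == "barra_counter_session") <;> simp
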